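-- pv_equiv track=rewrite | github.com/upesacm/21DaysOfCode-2024 | DSA/Hima-Swarupa-Padala/Quiz1/que2.py | min_max_value
-- ===== SOURCE A (Python) =====
-- def min_max_value(str):
--     n = len(str)
--     total_x = str.count('x')
--     total_y = str.count('y')
--
--     min_cost = float('inf')
--
--     left_x = 0
--     left_y = 0
--
--     for i in range(n + 1):
--         if i > 0:
--             if str[i - 1] == 'x':
--                 left_x += 1
--             else:
--                 left_y += 1
--
--         right_x = total_x - left_x
--         right_y = total_y - left_y
--
--         cost = max(right_x, left_y)
--         min_cost = min(min_cost, cost)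
--
--     return min_cost
-- ===== SOURCE B (Python) =====
-- def min_max_value(str):
--     # Build tables first, then reduce:
--     #   pre[i] = number of non-'x' characters in str[:i]
--     #   suf[i] = number of 'x' characters in str[i:]
--     pre = [0]
--     for c in str:
--         pre.append(pre[-1] + (0 if c == 'x' else 1))
--     suf = [0]
--     for c in reversed(str):
--         suf.append(suf[-1] + (1 if c == 'x' else 0))
--     suf.reverse()
--     costs = [max(s, p) for s, p in zip(suf, pre)]
--     best = costs[0]
--     for c in costs[1:]:
--         best = min(best, c)
--     return best
-- ===== Notes on version B (the rewrite author's own statement) =====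
-- stated objective: alternative
-- what changed: A fuses counting and min-tracking into one running scan over split indices with string indexing; B first builds explicit prefix (non-'x') and suffix ('x') count tables in two passes over the characters, then reduces the zipped cost table with a separate min pass.
import Mathlib
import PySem

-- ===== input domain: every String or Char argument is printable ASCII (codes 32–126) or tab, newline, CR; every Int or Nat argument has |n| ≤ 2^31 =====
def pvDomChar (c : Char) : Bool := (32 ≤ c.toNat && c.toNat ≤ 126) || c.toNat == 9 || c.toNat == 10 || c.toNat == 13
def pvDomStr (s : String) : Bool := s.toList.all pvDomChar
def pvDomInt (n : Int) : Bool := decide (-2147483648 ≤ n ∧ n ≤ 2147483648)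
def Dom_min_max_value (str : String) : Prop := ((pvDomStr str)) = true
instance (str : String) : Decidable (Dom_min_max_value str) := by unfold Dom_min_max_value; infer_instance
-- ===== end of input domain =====

-- B builds explicit prefix/suffix count tables in two passes and then reduces the
-- zipped cost table with a separate min pass, instead of A's fused running-min scan.

-- ===== PORT A =====
-- literal transliteration of A: one forward scan over split points i = 0..n,
-- maintaining left_x / left_y and a running minimum (float('inf') start modelled
-- as Option Int: none = inf, as in Python before the first iteration).
def min_max_value (str : String) : Int :=
  let n := PySem.Str.len str
  let totalX : Int := PySem.Str.count str "x"
  let totalY : Int := PySem.Str.count str "y"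
  let st := (PySem.List.pyRange 0 (n + 1) 1).foldl
    (fun (st : Int × Int × Option Int) i =>
      let p := if i > 0 then
          (if PySem.Str.pyGet? str (i - 1) = some 'x'
            then (st.1 + 1, st.2.1) else (st.1, st.2.1 + 1))
        else (st.1, st.2.1)
      let rx := totalX - p.1
      let _ry := totalY - p.2
      let cost := max rx p.2
      let mc := match st.2.2 with
        | none => some cost
        | some m => some (min m cost)
      (p.1, p.2, mc))
    (0, 0, none)
  st.2.2.getD 0

-- ===== PORT B =====
def min_max_value_alt (str : String) : Int :=
  let s := str.toList
  let pre := s.foldl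
    (fun acc c => acc ++ [PySem.List.pyGetD acc (-1) 0 + (if c = 'x' then 0 else 1)])
    [(0 : Int)]
  let sufR := s.reverse.foldl
    (fun acc c => acc ++ [PySem.List.pyGetD acc (-1) 0 + (if c = 'x' then 1 else 0)])
    [(0 : Int)]
  let suf := sufR.reverse
  let costs := (suf.zip pre).map (fun p => max p.1 p.2)
  let best := PySem.List.pyGetD costs 0 0
  (PySem.List.slice costs (some 1) none).foldl (fun b c => min b c) best

-- ===== PRECONDITION & SPEC =====
def Spec_min_max_value (str : String) (out : Int) : Prop := out = min_max_value_alt str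
instance (str : String) (out : Int) : Decidable (Spec_min_max_value str out) := by unfold Spec_min_max_value; infer_instance

-- ===== CLAIM (what is proved, stated in full; the proofs are below) =====
def Claim_equal_min_max_value : Prop := ∀ (str : String), Dom_min_max_value str → Spec_min_max_value str (min_max_value str)

-- ===== LEMMAS AND PROOFS =====

-- 0/1 indicator sums over a character list
def pvSX (l : List Char) : Int := (l.map (fun c => if c = 'x' then (1 : Int) else 0)).sum
def pvSY (l : List Char) : Int := (l.map (fun c => if c = 'x' then (0 : Int) else 1)).sum

-- cost of split point i, and the fold-shaped minimum of a nonempty list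
def pvCost (s : List Char) (i : Nat) : Int := max (pvSX s - pvSX (s.take i)) (pvSY (s.take i))
def pvHeadFold : List Int → Int
  | [] => 0
  | c :: cs => cs.foldl min c

-- reference form of the table-building loops of B
def pvScan (g : Char → Int) (a : Int) : List Char → List Int
  | [] => [a]
  | c :: t => a :: pvScan g (a + g c) t

theorem pv_count_go (c : Char) : ∀ (fuel : Nat) (l : List Char) (acc : Nat), l.length ≤ fuel →
    PySem.Chars.count.go [c] fuel l acc = acc + l.count c := by
  intro fuel
  induction fuel with
  | zero =>
    intro l acc h
    cases l with
    | nil => simp [PySem.Chars.count.go]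
    | cons a t => simp at h
  | succ n ih =>
    intro l acc h
    cases l with
    | nil => simp [PySem.Chars.count.go]
    | cons a t =>
      rw [PySem.Chars.count.go]
      by_cases hc : a = c
      · rw [if_pos (by simp [List.isPrefixOf, hc])]
        simp only [List.length_cons] at h
        rw [ih _ _ (by simpa using Nat.le_of_succ_le_succ h)]
        simp [hc]
        omega
      · rw [if_neg (by simp [List.isPrefixOf]; exact fun h' => hc h'.symm)]
        simp only [List.length_cons] at h
        rw [ih _ _ (Nat.le_of_succ_le_succ h)]
        simp [hc]

theorem pv_count_single (s : List Char) (c : Char) :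
    PySem.Chars.count s [c] = s.count c := by
  unfold PySem.Chars.count
  rw [if_neg (by simp), pv_count_go c s.length s 0 le_rfl]
  simp

theorem pvSX_count (s : List Char) : pvSX s = (s.count 'x' : Int) := by
  induction s with
  | nil => rfl
  | cons c t ih =>
    simp only [pvSX, List.map_cons, List.sum_cons, List.count_cons] at *
    by_cases h : c = 'x' <;> simp [h, ih] <;> omega

theorem pvSX_append (a b : List Char) : pvSX (a ++ b) = pvSX a + pvSX b := by
  simp [pvSX]

theorem pvSX_reverse (l : List Char) : pvSX l.reverse = pvSX l := by
  simp [pvSX, List.map_reverse, List.sum_reverse]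

theorem pvSX_single (c : Char) : pvSX [c] = if c = 'x' then 1 else 0 := by
  simp [pvSX]

theorem pvSY_append (a b : List Char) : pvSY (a ++ b) = pvSY a + pvSY b := by
  simp [pvSY]

theorem pvSY_single (c : Char) : pvSY [c] = if c = 'x' then 0 else 1 := by
  simp [pvSY]

theorem pvSX_nonneg (l : List Char) : 0 ≤ pvSX l := by
  induction l with
  | nil => simp [pvSX]
  | cons c t ih =>
    simp only [pvSX, List.map_cons, List.sum_cons] at *
    split_ifs <;> omega

theorem pvHeadFold_append (l : List Int) (a : Int) (h : l ≠ []) :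
    pvHeadFold (l ++ [a]) = min (pvHeadFold l) a := by
  cases l with
  | nil => exact absurd rfl h
  | cons c cs => simp [pvHeadFold, List.foldl_append]

-- A's loop invariant: after the split points 0..m the state is the two prefix
-- counters and the running minimum of the first m+1 costs.
theorem pvA_inv (str : String) (m : Nat) (hm : m ≤ str.toList.length) :
    ((List.range (m + 1)).map (fun (k : Nat) => ((0 : Int) + (k : Int)))).foldl
      (fun (st : Int × Int × Option Int) (i : Int) =>
        ((if i > 0 then
            if PySem.Str.pyGet? str (i - 1) = some 'x' then (st.1 + 1, st.2.1)
            else (st.1, st.2.1 + 1)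
          else (st.1, st.2.1)).1,
         (if i > 0 then
            if PySem.Str.pyGet? str (i - 1) = some 'x' then (st.1 + 1, st.2.1)
            else (st.1, st.2.1 + 1)
          else (st.1, st.2.1)).2,
         (match st.2.2 with
         | none =>
           some (max (((PySem.Str.count str "x" : Nat) : Int) -
               (if i > 0 then
                  if PySem.Str.pyGet? str (i - 1) = some 'x' then (st.1 + 1, st.2.1)
                  else (st.1, st.2.1 + 1)
                else (st.1, st.2.1)).1)
             (if i > 0 then
                if PySem.Str.pyGet? str (i - 1) = some 'x' then (st.1 + 1, st.2.1)
                else (st.1, st.2.1 + 1)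
              else (st.1, st.2.1)).2)
         | some m =>
           some (min m (max (((PySem.Str.count str "x" : Nat) : Int) -
               (if i > 0 then
                  if PySem.Str.pyGet? str (i - 1) = some 'x' then (st.1 + 1, st.2.1)
                  else (st.1, st.2.1 + 1)
                else (st.1, st.2.1)).1)
             (if i > 0 then
                if PySem.Str.pyGet? str (i - 1) = some 'x' then (st.1 + 1, st.2.1)
                else (st.1, st.2.1 + 1)
              else (st.1, st.2.1)).2)))))
      (0, 0, none)
    = (pvSX (str.toList.take m), pvSY (str.toList.take m),
       some (pvHeadFold ((List.range (m + 1)).map (pvCost str.toList)))) := by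
  have hX : ((PySem.Str.count str "x" : Nat) : Int) = pvSX str.toList := by
    have h1 : ("x" : String).toList = ['x'] := rfl
    rw [PySem.Str.count_eq, h1, pv_count_single, pvSX_count]
  induction m with
  | zero =>
    simp [List.range_one, pvCost, pvSX, pvSY, pvHeadFold]
    rw [pv_count_single, ← pvSX_count]
    show (pvSX str.toList : Int) = max (pvSX str.toList) 0
    exact (max_eq_left (pvSX_nonneg _)).symm
  | succ k ih =>
    have hklt : k < str.toList.length := hm
    rw [List.range_succ, List.map_append, List.foldl_append, ih (Nat.le_of_succ_le hm)]
    simp only [List.map_cons, List.map_nil, List.foldl_cons, List.foldl_nil]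
    rw [if_pos (show ((0 : Int) + ((k + 1 : Nat) : Int)) > 0 by push_cast; omega)]
    have hidx : ((0 : Int) + ((k + 1 : Nat) : Int)) - 1 = ((k : Nat) : Int) := by
      push_cast; ring
    rw [hidx, PySem.Str.pyGet?_natCast, List.getElem?_eq_getElem hklt]
    have htake : str.toList.take (k + 1) = str.toList.take k ++ [str.toList[k]] := by
      rw [List.take_add_one, List.getElem?_eq_getElem hklt]
      rfl
    have hmapne : (List.range (k + 1)).map (pvCost str.toList) ≠ [] := by simp
    rw [List.map_append, List.map_cons, List.map_nil, pvHeadFold_append _ _ hmapne]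
    by_cases hc : str.toList[k] = 'x'
    · rw [if_pos (by simp [hc])]
      simp only [htake, pvSX_append, pvSY_append, pvSX_single, pvSY_single, if_pos hc, hX,
        pvCost]
      simp
    · rw [if_neg (by simp [hc])]
      simp only [htake, pvSX_append, pvSY_append, pvSX_single, pvSY_single, if_neg hc, hX,
        pvCost]
      simp

theorem pvA_eq (str : String) :
    min_max_value str
      = pvHeadFold ((List.range (str.toList.length + 1)).map (pvCost str.toList)) := by
  unfold min_max_value
  simp only [PySem.Str.len_eq, PySem.List.pyRange_one]
  have h1 : (((str.toList.length : Int) + 1) - 0).toNat = str.toList.length + 1 := by omega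
  rw [h1, pvA_inv str str.toList.length le_rfl]
  rfl

-- B's table loop: appending last + g c starting from a nonempty seed is pvScan
theorem pvB_build (g : Char → Int) (l : List Char) : ∀ (init : List Int) (h : init ≠ []),
    l.foldl (fun acc c => acc ++ [PySem.List.pyGetD acc (-1) 0 + g c]) init
      = init.dropLast ++ pvScan g (init.getLast h) l := by
  induction l with
  | nil =>
    intro init h
    simp only [List.foldl_nil, pvScan]
    rw [List.dropLast_append_getLast h]
  | cons c t ih =>
    intro init h
    simp only [List.foldl_cons]
    rw [PySem.List.pyGetD_neg_one init 0 h]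
    rw [ih (init ++ [init.getLast h + g c]) (by simp)]
    have hx : (init ++ [init.getLast h + g c]).getLast (by simp) = init.getLast h + g c := by
      simp
    rw [hx, List.dropLast_concat]
    show init ++ pvScan g (init.getLast h + g c) t
        = init.dropLast ++ (init.getLast h :: pvScan g (init.getLast h + g c) t)
    rw [← List.singleton_append, ← List.append_assoc, List.dropLast_append_getLast h]

theorem pvScan_eq_map (g : Char → Int) (l : List Char) : ∀ (a : Int),
    pvScan g a l = (List.range (l.length + 1)).map (fun i => a + ((l.take i).map g).sum) := by
  induction l with
  | nil => intro a; simp [pvScan]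
  | cons c t ih =>
    intro a
    rw [pvScan, ih (a + g c)]
    conv_rhs => rw [List.length_cons, List.range_succ_eq_map]
    simp only [List.map_cons, List.map_map]
    congr 1
    · simp
    · apply List.map_congr_left
      intro i _
      simp only [Function.comp_apply, List.take_succ_cons, List.map_cons, List.sum_cons]
      ring

theorem pvB_tableY (l : List Char) :
    l.foldl (fun acc c => acc ++ [PySem.List.pyGetD acc (-1) 0 + (if c = 'x' then 0 else 1)])
      [(0 : Int)]
      = (List.range (l.length + 1)).map (fun i => pvSY (l.take i)) := by
  rw [pvB_build (fun c => if c = 'x' then 0 else 1) l [0] (by simp)]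
  simp [pvScan_eq_map, pvSY]

theorem pvB_tableX (l : List Char) :
    l.foldl (fun acc c => acc ++ [PySem.List.pyGetD acc (-1) 0 + (if c = 'x' then 1 else 0)])
      [(0 : Int)]
      = (List.range (l.length + 1)).map (fun i => pvSX (l.take i)) := by
  rw [pvB_build (fun c => if c = 'x' then 1 else 0) l [0] (by simp)]
  simp [pvScan_eq_map, pvSX]

theorem pvSuf_eq (s : List Char) :
    ((List.range (s.length + 1)).map (fun i => pvSX (s.reverse.take i))).reverse
      = (List.range (s.length + 1)).map (fun i => pvSX s - pvSX (s.take i)) := by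
  apply List.ext_getElem
  · simp
  · intro i h1 h2
    simp only [List.length_reverse, List.length_map, List.length_range] at h1 h2
    rw [List.getElem_reverse]
    simp only [List.getElem_map, List.getElem_range, List.length_map, List.length_range]
    have hi : i ≤ s.length := by omega
    have hidx : s.length + 1 - 1 - i = s.length - i := by omega
    rw [hidx]
    have hrt : s.reverse.take (s.length - i) = (s.drop i).reverse :=
      (List.reverse_drop).symm
    rw [hrt, pvSX_reverse]
    have hsplit : pvSX (s.take i) + pvSX (s.drop i) = pvSX s := by
      rw [← pvSX_append, List.take_append_drop]
    omega

theorem pvB_eq (str : String) :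
    min_max_value_alt str
      = pvHeadFold ((List.range (str.toList.length + 1)).map (pvCost str.toList)) := by
  unfold min_max_value_alt
  simp only [pvB_tableY, pvB_tableX, List.length_reverse]
  rw [pvSuf_eq, List.zip_map']
  simp only [List.map_map]
  have hcosts : ((List.range (str.toList.length + 1)).map
      ((fun p : Int × Int => max p.1 p.2) ∘
        (fun i => (pvSX str.toList - pvSX (str.toList.take i), pvSY (str.toList.take i)))))
      = (List.range (str.toList.length + 1)).map (pvCost str.toList) := by
    apply List.map_congr_left
    intro i _
    simp [pvCost]
  rw [hcosts, List.range_succ_eq_map, List.map_cons, PySem.List.pyGetD_zero_cons,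
    PySem.List.slice_from_one]
  simp [pvHeadFold]

-- ===== VERDICT (by name: the statement is the Claim_ definition above) =====
theorem min_max_value_spec : Claim_equal_min_max_value := by
  intro str _
  unfold Spec_min_max_value
  rw [pvA_eq, pvB_eq]
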